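-- pv_equiv track=rewrite | github.com/andreilb/Automation-Tool | mod_extract.py | group_activities_by_target
-- ===== SOURCE A (Python) =====
-- from collections import deque, defaultdict
--
-- def group_activities_by_target(activity_profile):
--     """Group activities within each timestep by target vertex"""
--     grouped_profile = []
--
--     for timestep_activities in activity_profile:
--         # Group by target vertex
--         target_groups = defaultdict(list)
--         for src, dst in timestep_activities:
--             target_groups[dst].append((src, dst))
--
--         # Flatten the groups
--         grouped_activities = []
--         for dst, arcs in target_groups.items():
--             grouped_activities.extend(arcs)
--
--         grouped_profile.append(grouped_activities)
--
--     return grouped_profile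
-- ===== SOURCE B (Python) =====
-- def group_activities_by_target(activity_profile):
--     """Group activities within each timestep by target vertex"""
--     grouped_profile = []
--     for timestep_activities in activity_profile:
--         order = list(dict.fromkeys(dst for _, dst in timestep_activities))
--         grouped_profile.append([(src, dst) for t in order
--                                 for src, dst in timestep_activities if dst == t])
--     return grouped_profile
-- ===== Notes on version B (the rewrite author's own statement) =====
-- stated objective: alternative
-- what changed: Replaces the per-timestep defaultdict bucketing + items-flatten with a two-pass strategy: first compute the distinct target vertices in first-appearance order (dict.fromkeys), then emit for each such target a filtering pass over the timestep's arcs; no per-key buckets are ever materialised.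
import Mathlib
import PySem

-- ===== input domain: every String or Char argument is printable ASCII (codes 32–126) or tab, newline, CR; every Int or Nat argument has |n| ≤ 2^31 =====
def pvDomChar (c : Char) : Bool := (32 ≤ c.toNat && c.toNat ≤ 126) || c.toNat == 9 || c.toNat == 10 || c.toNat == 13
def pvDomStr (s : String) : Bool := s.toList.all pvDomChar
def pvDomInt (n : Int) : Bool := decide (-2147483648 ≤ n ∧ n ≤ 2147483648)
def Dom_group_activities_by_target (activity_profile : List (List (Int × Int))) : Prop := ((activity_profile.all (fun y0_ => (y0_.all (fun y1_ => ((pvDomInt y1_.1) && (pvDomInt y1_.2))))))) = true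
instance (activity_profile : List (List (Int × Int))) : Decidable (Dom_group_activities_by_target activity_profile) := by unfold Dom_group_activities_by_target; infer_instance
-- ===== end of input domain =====

-- B replaces A's defaultdict bucketing+flatten by distinct-targets-then-filter passes (alternative decomposition, same results).


-- ===== PORT A =====
def group_activities_by_target (activity_profile : List (List (Int × Int))) : List (List (Int × Int)) :=
  activity_profile.foldl (fun grouped_profile timestep_activities =>
    -- target_groups = defaultdict(list); for src, dst in …: target_groups[dst].append((src, dst))
    let target_groups : PySem.Dict Int (List (Int × Int)) :=
      timestep_activities.foldl (fun d p => d.modify p.2 [] (· ++ [(p.1, p.2)])) PySem.Dict.empty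
    -- for dst, arcs in target_groups.items(): grouped_activities.extend(arcs)
    let grouped_activities := target_groups.items.foldl (fun acc kv => acc ++ kv.2) []
    grouped_profile ++ [grouped_activities]) []

-- ===== PORT B =====
def group_activities_by_target_alt (activity_profile : List (List (Int × Int))) : List (List (Int × Int)) :=
  activity_profile.foldl (fun grouped_profile timestep_activities =>
    -- order = list(dict.fromkeys(dst for _, dst in arcs))
    let order := PySem.List.dedup (timestep_activities.map (fun p => p.2))
    -- [(src, dst) for t in order for src, dst in arcs if dst == t]
    grouped_profile ++ [order.flatMap (fun t =>
      (timestep_activities.filter (fun p => p.2 == t)).map (fun p => (p.1, p.2)))]) []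

-- ===== PRECONDITION & SPEC =====
def Spec_group_activities_by_target (activity_profile : List (List (Int × Int))) (out : List (List (Int × Int))) : Prop := out = group_activities_by_target_alt activity_profile
instance (activity_profile : List (List (Int × Int))) (out : List (List (Int × Int))) : Decidable (Spec_group_activities_by_target activity_profile out) := by unfold Spec_group_activities_by_target; infer_instance

-- ===== CLAIM (what is proved, stated in full; the proofs are below) =====
def Claim_equal_group_activities_by_target : Prop := ∀ (activity_profile : List (List (Int × Int))), Dom_group_activities_by_target activity_profile → Spec_group_activities_by_target activity_profile (group_activities_by_target activity_profile)

-- ===== LEMMAS AND PROOFS =====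

-- the per-timestep bodies agree
theorem pv_timestep_eq (ts : List (Int × Int)) :
    ((ts.foldl (fun d p => d.modify p.2 [] (· ++ [(p.1, p.2)]))
        (PySem.Dict.empty : PySem.Dict Int (List (Int × Int)))).items.foldl
      (fun acc kv => acc ++ kv.2) []) =
    (PySem.List.dedup (ts.map (fun p => p.2))).flatMap (fun t =>
      (ts.filter (fun p => p.2 == t)).map (fun p => (p.1, p.2))) := by
  set d := ts.foldl (fun d p => d.modify p.2 [] (· ++ [(p.1, p.2)]))
      (PySem.Dict.empty : PySem.Dict Int (List (Int × Int))) with hd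
  have hnd : d.keys.Nodup := by
    rw [hd]
    exact PySem.Dict.nodup_keys_foldl_modify_key ts (fun p => p.2) []
      (fun d p => (· ++ [(p.1, p.2)])) _ (by simp [PySem.Dict.keys_empty])
  have hkeys : d.keys = PySem.List.dedup (ts.map (fun p => p.2)) := by
    rw [hd, PySem.Dict.keys_foldl_modify_key, PySem.Dict.keys_empty,
      PySem.Set.update_nil_left, PySem.List.dedup_eq_ofList]
  have hget : ∀ k, d.getD k [] = (ts.filter (fun p => p.2 == k)).map (fun p => (p.1, p.2)) := by
    intro k
    have hfm : d = (ts.map (fun p => (p.2, (p.1, p.2)))).foldl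
        (fun d q => d.modify q.1 [] (· ++ [q.2])) PySem.Dict.empty := by
      rw [hd, List.foldl_map]
    rw [hfm, PySem.Dict.getD_foldl_modify_append, PySem.Dict.getD_empty, List.nil_append,
      List.filter_map, List.map_map]
    rfl
  rw [PySem.List.foldl_append_eq_flatMap, List.nil_append,
    PySem.Dict.items_eq_map_keys d hnd [], List.flatMap_map, ← hkeys]
  exact List.flatMap_congr (fun k _ => hget k)

-- ===== VERDICT (by name: the statement is the Claim_ definition above) =====
theorem group_activities_by_target_spec : Claim_equal_group_activities_by_target := by
  intro ap _
  unfold Spec_group_activities_by_target group_activities_by_target group_activities_by_target_alt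
  rw [PySem.List.foldl_append_singleton_eq_map, PySem.List.foldl_append_singleton_eq_map]
  exact congrArg _ (List.map_congr_left (fun ts _ => pv_timestep_eq ts))
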